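-- pv_equiv track=rewrite | github.com/Ecologic-Computing/eperbit | eperbit.py | generate_msgsize_ticks
-- ===== SOURCE A (Python) =====
-- def generate_msgsize_ticks(max_bytes=1024**3):
--     """
--     Generate message size ticks and labels in binary units up to max_bytes (default 1GB).
--
--     Returns:
--     - tick_values: numeric values in bytes
--     - tick_labels: human-readable labels (B, KiB, MiB, GiB)
--     """
--     units = ["B", "KiB", "MiB", "GiB"]
--     tick_values = []
--     tick_labels = []
--
--     # Start at 32B, double each step
--     val = 32
--     while val <= max_bytes:
--         tick_values.append(val)
--         # Determine appropriate unit
--         for i, unit in enumerate(units):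
--             if val < 1024 ** (i + 1) or unit == "GiB":
--                 if unit == "B":
--                     label = f"{val}B"
--                 else:
--                     # divide by 2**(10*i)
--                     label = f"{int(val / (1024**i))}{unit}"
--                 tick_labels.append(label)
--                 break
--         val *= 2
--
--     return tick_values, tick_labels
-- ===== SOURCE B (Python) =====
-- def generate_msgsize_ticks(max_bytes=1024**3):
--     """
--     Generate message size ticks and labels in binary units up to max_bytes (default 1GB).
--
--     Returns:
--     - tick_values: numeric values in bytes
--     - tick_labels: human-readable labels (B, KiB, MiB, GiB)
--     """
--     units = ["B", "KiB", "MiB", "GiB"]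
--     # Ticks are 32 << j for j in range(n); 32 << j <= max_bytes iff j < bit_length(max_bytes) - 5.
--     n = max_bytes.bit_length() - 5 if max_bytes >= 32 else 0
--     tick_values = [32 << j for j in range(n)]
--     # Unit index for val = 2**(j+5) is min((j+5)//10, 3); the numeric part is val >> 10*i.
--     tick_labels = [f"{(32 << j) >> 10 * min((j + 5) // 10, 3)}{units[min((j + 5) // 10, 3)]}"
--                    for j in range(n)]
--     return tick_values, tick_labels
-- ===== Notes on version B (the rewrite author's own statement) =====
-- stated objective: simpler
-- what changed: A's while-loop with a per-value linear scan over the units list is replaced by a closed-form tick count from max_bytes.bit_length() and two comprehensions that pick the unit by direct arithmetic indexing (i = min((j+5)//10, 3)) and compute the numeric part with a shift.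
import Mathlib
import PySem

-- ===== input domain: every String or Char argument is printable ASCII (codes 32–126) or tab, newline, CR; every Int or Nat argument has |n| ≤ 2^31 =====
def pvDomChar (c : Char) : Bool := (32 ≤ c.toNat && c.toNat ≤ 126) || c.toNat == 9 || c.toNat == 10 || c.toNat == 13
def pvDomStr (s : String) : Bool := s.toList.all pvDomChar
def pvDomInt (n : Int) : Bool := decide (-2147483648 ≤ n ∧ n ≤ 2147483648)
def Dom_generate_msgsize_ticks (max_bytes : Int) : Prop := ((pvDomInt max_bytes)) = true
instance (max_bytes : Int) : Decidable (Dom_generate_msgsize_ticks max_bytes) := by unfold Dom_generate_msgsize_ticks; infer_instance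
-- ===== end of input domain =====

-- B replaces A's per-value linear unit scan by a closed-form tick count (bit_length) and
-- direct arithmetic unit indexing in two comprehensions; objective: simpler.

-- ===== PORT A =====

-- inner 'for i, unit in enumerate(units): if val < 1024**(i+1) or unit == "GiB": …; break'
-- (the Nat exponents i.toNat are exact: the enumerate indices are 0,1,2,3;
--  PySem.Int.truncdiv ports int(val / 1024**i), exact since here both operands are powers of two)
def pvLabelLoop (val : Int) : List (Int × String) → List String
  | [] => []   -- loop falls through without a break: nothing appended (unreachable: "GiB" always breaks)
  | (i, unit) :: rest =>
    if val < 1024 ^ (i.toNat + 1) || unit == "GiB" then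
      if unit == "B" then
        [PySem.Int.toStr val ++ "B"]
      else
        [PySem.Int.toStr (PySem.Int.truncdiv val (1024 ^ i.toNat)) ++ unit]
    else pvLabelLoop val rest

-- 'while val <= max_bytes: append val; append label; val *= 2'
-- (the '0 < val' conjunct is a termination guard only: the loop is entered with val = 32
--  and val only doubles, so positivity always holds and the guard never alters behaviour)
def pvTicksLoop (max_bytes val : Int)
    (tick_values : List Int) (tick_labels : List String) : List Int × List String :=
  if h : 0 < val ∧ val ≤ max_bytes then
    pvTicksLoop max_bytes (val * 2)
      (tick_values ++ [val])
      (tick_labels ++ pvLabelLoop val (PySem.List.enumerate ["B", "KiB", "MiB", "GiB"]))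
  else (tick_values, tick_labels)
  termination_by (max_bytes + 1 - val).toNat
  decreasing_by omega

def generate_msgsize_ticks (max_bytes : Int) : List Int × List String :=
  pvTicksLoop max_bytes 32 [] []

-- ===== PORT B =====

-- 'n = max_bytes.bit_length() - 5 if max_bytes >= 32 else 0' and the two comprehensions;
-- range indices j are nonnegative so j.toNat is exact, and Nat '/', 'min', '<<<', '>>>'
-- match Python's floor division, min and shifts on them.
def generate_msgsize_ticks_alt (max_bytes : Int) : List Int × List String :=
  let units := ["B", "KiB", "MiB", "GiB"]
  let n : Int := if 32 ≤ max_bytes then (PySem.Int.bitLength max_bytes : Int) - 5 else 0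
  let tick_values := (PySem.List.pyRange 0 n 1).map (fun j => (32 : Int) <<< j.toNat)
  let tick_labels := (PySem.List.pyRange 0 n 1).map (fun j =>
    let i := min ((j.toNat + 5) / 10) 3
    PySem.Int.toStr (((32 : Int) <<< j.toNat) >>> (10 * i)) ++ units.getD i "")
  (tick_values, tick_labels)

-- ===== PRECONDITION & SPEC =====
def Spec_generate_msgsize_ticks (max_bytes : Int) (out : List Int × List String) : Prop := out = generate_msgsize_ticks_alt max_bytes
instance (max_bytes : Int) (out : List Int × List String) : Decidable (Spec_generate_msgsize_ticks max_bytes out) := by unfold Spec_generate_msgsize_ticks; infer_instance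

-- ===== CLAIM (what is proved, stated in full; the proofs are below) =====
def Claim_equal_generate_msgsize_ticks : Prop := ∀ (max_bytes : Int), Dom_generate_msgsize_ticks max_bytes → Spec_generate_msgsize_ticks max_bytes (generate_msgsize_ticks max_bytes)

-- ===== LEMMAS AND PROOFS =====

-- number of ticks, as a Nat
def pvN (m : Int) : Nat := if 32 ≤ m then PySem.Int.bitLength m - 5 else 0

-- B's label formula at range index j
def pvLabB (j : Nat) : String :=
  PySem.Int.toStr (((32 : Int) <<< j) >>> (10 * min ((j + 5) / 10) 3)) ++
    ["B", "KiB", "MiB", "GiB"].getD (min ((j + 5) / 10) 3) ""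

lemma pvBitLen_le_iff (m : Int) (e : Nat) (hm : 0 < m) :
    2 ^ e ≤ m ↔ e < PySem.Int.bitLength m := by
  have hcast : (m.natAbs : Int) = m := Int.natAbs_of_nonneg (le_of_lt hm)
  constructor
  · intro h
    have h1 := PySem.Int.lt_two_pow_bitLength m
    have h2 : 2 ^ e ≤ m.natAbs := by
      have : (2 : Int) ^ e ≤ (m.natAbs : Int) := by rw [hcast]; exact h
      exact_mod_cast this
    exact (Nat.pow_lt_pow_iff_right (by norm_num)).mp (lt_of_le_of_lt h2 h1)
  · intro h
    have h2 := PySem.Int.two_pow_bitLength_le m (by omega)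
    have h4 : 2 ^ e ≤ m.natAbs :=
      le_trans (Nat.pow_le_pow_right (by norm_num) (by omega)) h2
    have : ((2 : Nat) ^ e : Int) ≤ (m.natAbs : Int) := by exact_mod_cast h4
    rw [hcast] at this
    exact_mod_cast this

lemma pvLe_iff (m : Int) (k : Nat) : 32 * 2 ^ k ≤ m ↔ k < pvN m := by
  unfold pvN
  by_cases h32 : 32 ≤ m
  · simp only [if_pos h32]
    have h6 : 6 ≤ PySem.Int.bitLength m := by
      have h5 : (2 : Int) ^ 5 ≤ m := by norm_num; omega
      have := (pvBitLen_le_iff m 5 (by omega)).mp h5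
      omega
    rw [show (32 : Int) * 2 ^ k = 2 ^ (k + 5) by ring, pvBitLen_le_iff m (k + 5) (by omega)]
    omega
  · simp only [if_neg h32]
    have h1 : (1 : Int) ≤ 2 ^ k := one_le_pow₀ (by norm_num)
    constructor
    · intro h; omega
    · omega

-- int(val / 1024**i) equals the arithmetic shift B uses, when 2^(10i) divides val = 32·2^j
lemma pvDivShift (j i : Nat) (h : 10 * i ≤ j + 5) :
    PySem.Int.truncdiv (32 * 2 ^ j) (1024 ^ i) = (32 : Int) <<< j >>> (10 * i) := by
  have h32 : (32 : Int) * 2 ^ j = 2 ^ (j + 5) := by ring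
  have hL : PySem.Int.truncdiv (32 * 2 ^ j) (1024 ^ i) = 2 ^ (j + 5 - 10 * i) := by
    simp only [PySem.Int.truncdiv, h32,
      show (1024 : Int) ^ i = 2 ^ (10 * i) by rw [show (1024 : Int) = 2 ^ 10 by norm_num, ← pow_mul]]
    rw [show (2 : Int) ^ (j + 5) = 2 ^ (j + 5 - 10 * i) * 2 ^ (10 * i) by
      rw [← pow_add]; congr 1; omega]
    exact Int.mul_tdiv_cancel _ (by positivity)
  have hR : (32 : Int) <<< j >>> (10 * i) = 2 ^ (j + 5 - 10 * i) := by
    rw [Int.shiftLeft_eq, h32, show ((2 : Int) ^ (j + 5)) = ((2 ^ (j + 5) : Nat) : Int) by push_cast; ring,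
        ← Int.natCast_shiftRight, Nat.shiftRight_eq_div_pow, Nat.pow_div (by omega) (by norm_num)]
    push_cast; ring
  rw [hL, hR]

lemma pvLabelEq (j : Nat) :
    pvLabelLoop (32 * 2 ^ j) (PySem.List.enumerate ["B", "KiB", "MiB", "GiB"]) = [pvLabB j] := by
  have henum : PySem.List.enumerate ["B", "KiB", "MiB", "GiB"] =
      [((0 : Int), "B"), (1, "KiB"), (2, "MiB"), (3, "GiB")] := by decide
  have hlt : ∀ b : Nat, ((32 : Int) * 2 ^ j < 1024 ^ b ↔ j + 5 < 10 * b) := by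
    intro b
    rw [show (32 : Int) * 2 ^ j = 2 ^ (j + 5) by ring,
        show (1024 : Int) ^ b = 2 ^ (10 * b) by rw [show (1024 : Int) = 2 ^ 10 by norm_num, ← pow_mul]]
    exact pow_lt_pow_iff_right₀ one_lt_two
  have hlt1 : ((32 : Int) * 2 ^ j < 1024 ↔ j + 5 < 10) := by have := hlt 1; norm_num at this; exact this
  have hlt2 : ((32 : Int) * 2 ^ j < 1048576 ↔ j + 5 < 20) := by have := hlt 2; norm_num at this; exact this
  have hlt3 : ((32 : Int) * 2 ^ j < 1073741824 ↔ j + 5 < 30) := by have := hlt 3; norm_num at this; exact this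
  rw [henum]
  rcases lt_or_ge j 5 with h | h
  · have hdiv : (j + 5) / 10 = 0 := by omega
    have c0 : (32 : Int) * 2 ^ j < 1024 := hlt1.mpr (by omega)
    simp [pvLabelLoop, pvLabB, hdiv, c0, Int.shiftLeft_eq]
  · rcases lt_or_ge j 15 with h' | h'
    · have hdiv : (j + 5) / 10 = 1 := by omega
      have c0 : ¬ (32 : Int) * 2 ^ j < 1024 := by rw [hlt1]; omega
      have c1 : (32 : Int) * 2 ^ j < 1048576 := hlt2.mpr (by omega)
      have hd1 : PySem.Int.truncdiv (32 * 2 ^ j) 1024 = (32 : Int) <<< j >>> 10 := by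
        have := pvDivShift j 1 (by omega); norm_num at this; exact this
      simp [pvLabelLoop, pvLabB, hdiv, c0, c1, hd1]
      rfl
    · rcases lt_or_ge j 25 with h'' | h''
      · have hdiv : (j + 5) / 10 = 2 := by omega
        have c0 : ¬ (32 : Int) * 2 ^ j < 1024 := by rw [hlt1]; omega
        have c1 : ¬ (32 : Int) * 2 ^ j < 1048576 := by rw [hlt2]; omega
        have c2 : (32 : Int) * 2 ^ j < 1073741824 := hlt3.mpr (by omega)
        have hd2 : PySem.Int.truncdiv (32 * 2 ^ j) 1048576 = (32 : Int) <<< j >>> 20 := by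
          have := pvDivShift j 2 (by omega); norm_num at this; exact this
        simp [pvLabelLoop, pvLabB, hdiv, c0, c1, c2, hd2]
        rfl
      · have hdiv : min ((j + 5) / 10) 3 = 3 := by omega
        have c0 : ¬ (32 : Int) * 2 ^ j < 1024 := by rw [hlt1]; omega
        have c1 : ¬ (32 : Int) * 2 ^ j < 1048576 := by rw [hlt2]; omega
        have c2 : ¬ (32 : Int) * 2 ^ j < 1073741824 := by rw [hlt3]; omega
        have hd3 : PySem.Int.truncdiv (32 * 2 ^ j) 1073741824 = (32 : Int) <<< j >>> 30 := by
          have := pvDivShift j 3 (by omega); norm_num at this; exact this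
        simp [pvLabelLoop, pvLabB, hdiv, c0, c1, c2, hd3]
        rfl

-- accumulator characterisation of A's while-loop, starting at val = 32·2^k
lemma pvTicksLoopChar (m : Int) (d k : Nat) (hd : pvN m - k = d)
    (tv : List Int) (tl : List String) :
    pvTicksLoop m (32 * 2 ^ k) tv tl =
      (tv ++ (List.range' k (pvN m - k)).map (fun j => 32 * 2 ^ j),
       tl ++ (List.range' k (pvN m - k)).map pvLabB) := by
  induction d generalizing k tv tl with
  | zero =>
    unfold pvTicksLoop
    have hk : ¬ (32 * 2 ^ k ≤ m) := by rw [pvLe_iff]; omega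
    rw [dif_neg (by omega)]
    simp [hd]
  | succ d ih =>
    unfold pvTicksLoop
    have hk : 32 * 2 ^ k ≤ m := by rw [pvLe_iff]; omega
    rw [dif_pos ⟨by positivity, hk⟩, pvLabelEq k,
        show (32 : Int) * 2 ^ k * 2 = 32 * 2 ^ (k + 1) by ring,
        ih (k + 1) (by omega) _ _,
        show List.range' k (pvN m - k) = k :: List.range' (k + 1) (pvN m - (k + 1)) by
          rw [show pvN m - k = (pvN m - (k + 1)) + 1 by omega, List.range'_succ]]
    simp

lemma pvAltChar (m : Int) :
    generate_msgsize_ticks_alt m =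
      ((List.range (pvN m)).map (fun j => 32 * 2 ^ j), (List.range (pvN m)).map pvLabB) := by
  unfold generate_msgsize_ticks_alt
  have hn : (((if 32 ≤ m then (PySem.Int.bitLength m : Int) - 5 else 0)) - 0).toNat = pvN m := by
    unfold pvN; split <;> omega
  simp only [PySem.List.pyRange_one, hn, List.map_map]
  simp only [Prod.mk.injEq]
  refine ⟨?_, ?_⟩ <;>
  · apply List.map_congr_left
    intro k _
    simp [pvLabB, Int.shiftLeft_natCast_right, Int.shiftLeft_eq]

-- ===== VERDICT (by name: the statement is the Claim_ definition above) =====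
theorem generate_msgsize_ticks_spec : Claim_equal_generate_msgsize_ticks := by
  intro m _
  unfold Spec_generate_msgsize_ticks generate_msgsize_ticks
  have h := pvTicksLoopChar m (pvN m) 0 (by omega) [] []
  simp only [pow_zero, mul_one, Nat.sub_zero, List.nil_append, ← List.range_eq_range'] at h
  rw [h, pvAltChar]
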